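-- pv_equiv track=rewrite | github.com/geemaple/leetcode | leetcode/930.binary-subarrays-with-sum.py | count
-- ===== SOURCE A (Python) =====
-- from typing import List
--
-- def count(nums: List[int], k: int) -> int:
--     n = len(nums)
--     i = 0
--     total = 0
--     res = 0
--     for j in range(n):
--         total += nums[j]
--         while i <= j and total > k:
--             total -= nums[i]
--             i += 1
--
--         res += j - i + 1
--     return res
-- ===== SOURCE B (Python) =====
-- from typing import List
--
-- def count(nums: List[int], k: int) -> int:
--     # Count per LEFT endpoint: precompute prefix sums P; for each left endpoint p,
--     # find the step T at which p leaves the window (first t >= max(previous T, p)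
--     # whose window sum P[t+1]-P[p] exceeds k, or n), and add T - p.
--     P = [0]
--     for x in nums:
--         P.append(P[-1] + x)
--     n = len(nums)
--     res = 0
--     t = 0
--     for p in range(n):
--         if t < p:
--             t = p
--         while t < n and P[t + 1] - P[p] <= k:
--             t += 1
--         res += t - p
--     return res
-- ===== Notes on version B (the rewrite author's own statement) =====
-- stated objective: alternative
-- what changed: Replaces the right-endpoint sliding window with running total (res += window length per right endpoint) by a left-endpoint dual on a precomputed prefix-sum array: for each left endpoint p it finds the exit step T[p] (first t >= max(T[p-1], p) with P[t+1]-P[p] > k) and adds T[p]-p.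
import Mathlib
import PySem

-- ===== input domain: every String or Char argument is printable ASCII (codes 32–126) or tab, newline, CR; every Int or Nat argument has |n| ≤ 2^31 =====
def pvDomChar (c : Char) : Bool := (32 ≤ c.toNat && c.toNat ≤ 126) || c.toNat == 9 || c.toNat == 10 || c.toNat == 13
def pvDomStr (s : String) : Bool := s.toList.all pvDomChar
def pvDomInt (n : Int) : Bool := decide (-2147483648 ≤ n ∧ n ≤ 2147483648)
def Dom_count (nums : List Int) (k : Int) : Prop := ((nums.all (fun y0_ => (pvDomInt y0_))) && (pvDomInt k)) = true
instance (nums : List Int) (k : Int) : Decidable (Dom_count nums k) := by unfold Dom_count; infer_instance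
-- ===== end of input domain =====

-- B replaces A's right-endpoint sliding window with a running total by a left-endpoint dual on a
-- precomputed prefix-sum array (exit step per left endpoint); alternative algorithm, same O(n) cost.

-- ===== PORT A =====
-- the inner 'while i <= j and total > k: total -= nums[i]; i += 1' loop of A
def aShrink (nums : List Int) (k j i total : Int) : Int × Int :=
  if _h : i ≤ j ∧ total > k then
    aShrink nums k j (i + 1) (total - PySem.List.pyGetD nums i 0)
  else (i, total)
termination_by (j + 1 - i).toNat
decreasing_by omega

def count (nums : List Int) (k : Int) : Int :=
  let n : Int := (nums.length : Int)
  let st := (PySem.List.pyRange 0 n 1).foldl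
    (fun (st : Int × Int × Int) (j : Int) =>
      let total := st.2.1 + PySem.List.pyGetD nums j 0
      let it := aShrink nums k j st.1 total
      (it.1, it.2, st.2.2 + j - it.1 + 1))
    (0, 0, 0)
  st.2.2

-- ===== PORT B =====
-- the inner 'while t < n and P[t+1] - P[p] <= k: t += 1' loop of B
def bAdv (P : List Int) (k n pp t : Int) : Int :=
  if _h : t < n ∧ PySem.List.pyGetD P (t + 1) 0 - pp ≤ k then
    bAdv P k n pp (t + 1)
  else t
termination_by (n - t).toNat
decreasing_by omega

def count_alt (nums : List Int) (k : Int) : Int :=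
  let P := nums.foldl (fun acc x => acc ++ [PySem.List.pyGetD acc (-1) 0 + x]) [0]
  let n : Int := (nums.length : Int)
  let st := (PySem.List.pyRange 0 n 1).foldl
    (fun (st : Int × Int) (p : Int) =>
      let t0 := if st.1 < p then p else st.1
      let t := bAdv P k n (PySem.List.pyGetD P p 0) t0
      (t, st.2 + t - p))
    (0, 0)
  st.2

-- ===== PRECONDITION & SPEC =====
def Spec_count (nums : List Int) (k : Int) (out : Int) : Prop := out = count_alt nums k
instance (nums : List Int) (k : Int) (out : Int) : Decidable (Spec_count nums k out) := by unfold Spec_count; infer_instance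

-- ===== CLAIM (what is proved, stated in full; the proofs are below) =====
def Claim_equal_count : Prop := ∀ (nums : List Int) (k : Int), Dom_count nums k → Spec_count nums k (count nums k)

-- ===== LEMMAS AND PROOFS =====

-- prefix sums: pvS nums t = nums[0] + … + nums[t-1]
def pvS (nums : List Int) (t : ℕ) : Int := (nums.take t).sum

theorem pvS_succ (nums : List Int) (t : ℕ) (ht : t < nums.length) :
    pvS nums (t + 1) = pvS nums t + nums[t] := by
  unfold pvS
  induction nums generalizing t with
  | nil => simp at ht
  | cons x xs ih =>
    cases t with
    | zero => simp
    | succ m =>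
      simp only [List.take_succ_cons, List.sum_cons, List.getElem_cons_succ]
      rw [ih m (by simpa using ht)]
      ring

theorem pvS_cons (x : Int) (l : List Int) (t : ℕ) :
    pvS (x :: l) (t + 1) = x + pvS l t := by
  simp [pvS, List.take_succ_cons]

-- spec-level version of A's inner loop, over ℕ indices
def adv (nums : List Int) (k : Int) (j i : ℕ) : ℕ :=
  if i ≤ j ∧ pvS nums (j + 1) - pvS nums i > k then adv nums k j (i + 1) else i
termination_by j + 1 - i
decreasing_by omega

theorem adv_le (nums : List Int) (k : Int) (j i : ℕ) (h : i ≤ j + 1) :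
    adv nums k j i ≤ j + 1 := by
  fun_induction adv with
  | case1 i hc ih => exact ih (by omega)
  | case2 i hc => exact h

-- left boundary of A's window after each step
def Iseq (nums : List Int) (k : Int) : ℕ → ℕ
  | 0 => 0
  | j + 1 => adv nums k j (Iseq nums k j)

theorem Iseq_le (nums : List Int) (k : Int) : ∀ m, Iseq nums k m ≤ m := by
  intro m
  induction m with
  | zero => simp [Iseq]
  | succ q ih => exact adv_le nums k q _ (by omega)

theorem aShrink_eq (nums : List Int) (k : Int) (j i : ℕ)
    (hj : j < nums.length) (hi : i ≤ j + 1) :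
    aShrink nums k (j : ℤ) (i : ℤ) (pvS nums (j + 1) - pvS nums i)
      = ((adv nums k j i : ℤ), pvS nums (j + 1) - pvS nums (adv nums k j i)) := by
  fun_induction adv nums k j i with
  | case1 i hc ih =>
    rw [aShrink]
    rw [dif_pos (by constructor <;> [exact_mod_cast hc.1; exact hc.2])]
    have hilen : i < nums.length := by omega
    have hg : PySem.List.pyGetD nums (i : ℤ) 0 = nums[i] := by
      rw [PySem.List.pyGetD_natCast]
      exact List.getD_eq_getElem _ _ hilen
    rw [hg]
    have hs : pvS nums (j + 1) - pvS nums i - nums[i] = pvS nums (j + 1) - pvS nums (i + 1) := by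
      rw [pvS_succ nums i hilen]; ring
    rw [hs]
    have := ih (by omega)
    exact_mod_cast this
  | case2 i hc =>
    rw [aShrink]
    rw [dif_neg]
    intro ⟨h1, h2⟩
    exact hc ⟨by exact_mod_cast h1, h2⟩

-- A's loop invariant: after m steps the state is (Iseq m, windowed total, partial sum of counts)
theorem countA_loop (nums : List Int) (k : Int) :
    ∀ m, m ≤ nums.length →
    (PySem.List.pyRange 0 (m : ℤ) 1).foldl
      (fun (st : Int × Int × Int) (j : Int) =>
        let total := st.2.1 + PySem.List.pyGetD nums j 0
        let it := aShrink nums k j st.1 total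
        (it.1, it.2, st.2.2 + j - it.1 + 1))
      (0, 0, 0)
    = ((Iseq nums k m : ℤ), pvS nums m - pvS nums (Iseq nums k m),
        ∑ j ∈ Finset.range m, ((j : ℤ) + 1 - (Iseq nums k (j + 1) : ℤ))) := by
  intro m
  induction m with
  | zero => intro _; simp [PySem.List.pyRange_one_eq_nil, Iseq, pvS]
  | succ m ih =>
    intro h
    have hcast : ((m + 1 : ℕ) : ℤ) = (m : ℤ) + 1 := by push_cast; ring
    rw [hcast, PySem.List.pyRange_one_succ_right (by positivity), List.foldl_append,
        ih (by omega)]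
    simp only [List.foldl_cons, List.foldl_nil]
    have hm : m < nums.length := by omega
    have htot : pvS nums m - pvS nums (Iseq nums k m) + PySem.List.pyGetD nums (m : ℤ) 0
        = pvS nums (m + 1) - pvS nums (Iseq nums k m) := by
      rw [PySem.List.pyGetD_natCast, List.getD_eq_getElem _ _ hm, pvS_succ nums m hm]; ring
    rw [htot]
    rw [aShrink_eq nums k m (Iseq nums k m) hm (by have := Iseq_le nums k m; omega)]
    have hIs : adv nums k m (Iseq nums k m) = Iseq nums k (m + 1) := rfl
    rw [hIs]
    rw [Finset.sum_range_succ]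
    have hval : (∑ j ∈ Finset.range m, ((j : ℤ) + 1 - (Iseq nums k (j + 1) : ℤ))) + (m : ℤ)
        - (Iseq nums k (m + 1) : ℤ) + 1
        = (∑ x ∈ Finset.range m, ((x : ℤ) + 1 - (Iseq nums k (x + 1) : ℤ)))
          + ((m : ℤ) + 1 - (Iseq nums k (m + 1) : ℤ)) := by ring
    exact Prod.ext rfl (Prod.ext rfl hval)

theorem count_eq (nums : List Int) (k : Int) :
    count nums k
      = ∑ j ∈ Finset.range nums.length, ((j : ℤ) + 1 - (Iseq nums k (j + 1) : ℤ)) := by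
  simp only [count]
  rw [countA_loop nums k nums.length (le_refl _)]

-- spec-level version of B's inner loop, over ℕ indices
def advT (nums : List Int) (k : Int) (n p t : ℕ) : ℕ :=
  if t < n ∧ pvS nums (t + 1) - pvS nums p ≤ k then advT nums k n p (t + 1) else t
termination_by n - t
decreasing_by omega

-- B's running t before processing left endpoint p
def tseq (nums : List Int) (k : Int) (n : ℕ) : ℕ → ℕ
  | 0 => 0
  | p + 1 => advT nums k n p (max (tseq nums k n p) p)

-- exit step of left endpoint p
def Tel (nums : List Int) (k : Int) (n p : ℕ) : ℕ := tseq nums k n (p + 1)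

theorem advT_ge (nums : List Int) (k : Int) (n p t : ℕ) : t ≤ advT nums k n p t := by
  fun_induction advT <;> omega

theorem advT_le (nums : List Int) (k : Int) (n p t : ℕ) (h : t ≤ n) :
    advT nums k n p t ≤ n := by
  fun_induction advT with
  | case1 t hc ih => exact ih (by omega)
  | case2 t hc => exact h

theorem advT_stop (nums : List Int) (k : Int) (n p t : ℕ) :
    ¬(advT nums k n p t < n ∧ pvS nums (advT nums k n p t + 1) - pvS nums p ≤ k) := by
  fun_induction advT with
  | case1 t hc ih => exact ih
  | case2 t hc => exact hc

theorem advT_min (nums : List Int) (k : Int) (n p t : ℕ) :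
    ∀ u, t ≤ u → u < advT nums k n p t → u < n ∧ pvS nums (u + 1) - pvS nums p ≤ k := by
  fun_induction advT with
  | case1 t hc ih =>
    intro u h1 h2
    rcases Nat.eq_or_lt_of_le h1 with rfl | h1
    · exact hc
    · exact ih u h1 h2
  | case2 t hc => intro u h1 h2; omega

theorem tseq_le (nums : List Int) (k : Int) (n : ℕ) :
    ∀ p, p ≤ n → tseq nums k n p ≤ n := by
  intro p
  induction p with
  | zero => intro _; simp [tseq]
  | succ q ih =>
    intro h
    exact advT_le nums k n q _ (by have := ih (by omega); omega)

theorem Tel_ge (nums : List Int) (k : Int) (n p : ℕ) : p ≤ Tel nums k n p :=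
  le_trans (le_max_right _ _) (advT_ge nums k n p _)

theorem Tel_le (nums : List Int) (k : Int) (n p : ℕ) (h : p ≤ n) : Tel nums k n p ≤ n :=
  advT_le nums k n p _ (by have := tseq_le nums k n p h; omega)

theorem Tel_mono (nums : List Int) (k : Int) (n : ℕ) :
    ∀ p q, p ≤ q → Tel nums k n p ≤ Tel nums k n q := by
  have step : ∀ p, Tel nums k n p ≤ Tel nums k n (p + 1) := by
    intro p
    calc Tel nums k n p ≤ max (tseq nums k n (p + 1)) (p + 1) := le_max_left _ _
    _ ≤ advT nums k n (p + 1) _ := advT_ge _ _ _ _ _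
    _ = Tel nums k n (p + 1) := rfl
  intro p q h
  induction q with
  | zero =>
    have : p = 0 := by omega
    subst this; exact le_refl _
  | succ r ih =>
    rcases Nat.eq_or_lt_of_le h with rfl | h'
    · exact le_refl _
    · exact le_trans (ih (by omega)) (step r)

theorem Tel_Q (nums : List Int) (k : Int) (n p : ℕ) (h : Tel nums k n p < n) :
    pvS nums (Tel nums k n p + 1) - pvS nums p > k := by
  have hstop := advT_stop nums k n p (max (tseq nums k n p) p)
  have hT : Tel nums k n p = advT nums k n p (max (tseq nums k n p) p) := rfl
  rw [← hT] at hstop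
  by_contra hq
  exact hstop ⟨h, by omega⟩

theorem Tel_min (nums : List Int) (k : Int) (n p : ℕ) :
    ∀ u, max (tseq nums k n p) p ≤ u → u < Tel nums k n p →
      u < n ∧ pvS nums (u + 1) - pvS nums p ≤ k := by
  intro u h1 h2
  exact advT_min nums k n p _ u h1 h2

-- G j = first left endpoint whose exit step is ≥ j (the value of A's window boundary, see adv_G)
theorem Gex (nums : List Int) (k : Int) (n j : ℕ) : ∃ p, j ≤ Tel nums k n p :=
  ⟨j, Tel_ge nums k n j⟩

def Gfun (nums : List Int) (k : Int) (n j : ℕ) : ℕ := Nat.find (Gex nums k n j)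

theorem Gfun_spec (nums : List Int) (k : Int) (n j : ℕ) :
    j ≤ Tel nums k n (Gfun nums k n j) := Nat.find_spec (Gex nums k n j)

theorem Gfun_le (nums : List Int) (k : Int) (n j p : ℕ) (h : j ≤ Tel nums k n p) :
    Gfun nums k n j ≤ p := Nat.find_min' (Gex nums k n j) h

theorem Gfun_not (nums : List Int) (k : Int) (n j p : ℕ) (h : p < Gfun nums k n j) :
    ¬ j ≤ Tel nums k n p := Nat.find_min (Gex nums k n j) h

theorem Gfun_le_iff (nums : List Int) (k : Int) (n j p : ℕ) :
    Gfun nums k n j ≤ p ↔ j ≤ Tel nums k n p := by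
  constructor
  · intro h
    exact le_trans (Gfun_spec nums k n j) (Tel_mono nums k n _ _ h)
  · exact Gfun_le nums k n j p

theorem Gfun_mono (nums : List Int) (k : Int) (n j j' : ℕ) (h : j ≤ j') :
    Gfun nums k n j ≤ Gfun nums k n j' :=
  Gfun_le nums k n j _ (le_trans h (Gfun_spec nums k n j'))

theorem Gfun_zero (nums : List Int) (k : Int) (n : ℕ) : Gfun nums k n 0 = 0 :=
  Nat.le_zero.mp (Gfun_le nums k n 0 0 (Nat.zero_le _))

-- A's inner loop scans exactly from one boundary value to the next
theorem adv_scan (nums : List Int) (k : Int) (j : ℕ) :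
    ∀ (d g g' : ℕ), g' - g = d → g ≤ g' →
      (∀ p, g ≤ p → p < g' → (p ≤ j ∧ pvS nums (j + 1) - pvS nums p > k)) →
      ¬(g' ≤ j ∧ pvS nums (j + 1) - pvS nums g' > k) →
      adv nums k j g = g' := by
  intro d
  induction d with
  | zero =>
    intro g g' h1 h2 _ hstop
    have : g = g' := by omega
    subst this
    rw [adv, if_neg hstop]
  | succ e ih =>
    intro g g' h1 h2 hmid hstop
    have hlt : g < g' := by omega
    rw [adv, if_pos (hmid g (le_refl g) hlt)]
    exact ih (g + 1) g' (by omega) (by omega) (fun p hp1 hp2 => hmid p (by omega) hp2) hstop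

-- key duality: A's window boundary advances exactly to the next G value
theorem adv_G (nums : List Int) (k : Int) (n j : ℕ) (hj : j < n) :
    adv nums k j (Gfun nums k n j) = Gfun nums k n (j + 1) := by
  apply adv_scan nums k j (Gfun nums k n (j + 1) - Gfun nums k n j) _ _ rfl
    (Gfun_mono nums k n j (j + 1) (by omega))
  · intro p hp1 hp2
    have hTge : j ≤ Tel nums k n p := (Gfun_le_iff nums k n j p).mp hp1
    have hTlt : Tel nums k n p < j + 1 := by
      by_contra h
      exact absurd ((Gfun_le_iff nums k n (j + 1) p).mpr (by omega)) (by omega)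
    have hTeq : Tel nums k n p = j := by omega
    refine ⟨by have := Tel_ge nums k n p; omega, ?_⟩
    have := Tel_Q nums k n p (by omega)
    rwa [hTeq] at this
  · intro ⟨h1, h2⟩
    set g' := Gfun nums k n (j + 1) with hg'
    have hTge : j + 1 ≤ Tel nums k n g' := Gfun_spec nums k n (j + 1)
    have hts : tseq nums k n g' ≤ j := by
      cases hgc : g' with
      | zero => simp [tseq]
      | succ q =>
        have hq : q < g' := by omega
        have hnot := Gfun_not nums k n (j + 1) q hq
        have hle : Tel nums k n q ≤ j := by omega
        calc tseq nums k n (q + 1) = Tel nums k n q := rfl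
        _ ≤ j := hle
    have := Tel_min nums k n g' j (by omega) (by omega)
    omega

theorem Iseq_eq_G (nums : List Int) (k : Int) (n : ℕ) :
    ∀ j, j ≤ n → Iseq nums k j = Gfun nums k n j := by
  intro j
  induction j with
  | zero => intro _; simp [Iseq, Gfun_zero]
  | succ m ih =>
    intro h
    calc Iseq nums k (m + 1) = adv nums k m (Iseq nums k m) := rfl
    _ = adv nums k m (Gfun nums k n m) := by rw [ih (by omega)]
    _ = Gfun nums k n (m + 1) := adv_G nums k n m (by omega)

-- B's prefix list is the table of prefix sums
theorem bP_gen (l : List Int) :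
    ∀ (acc : List Int) (c : Int) (hne : acc ≠ []), acc.getLast hne = c →
    l.foldl (fun acc x => acc ++ [PySem.List.pyGetD acc (-1) 0 + x]) acc
      = acc ++ (List.range l.length).map (fun t => c + pvS l (t + 1)) := by
  induction l with
  | nil => intro acc c hne hl; simp
  | cons x xs ih =>
    intro acc c hne hl
    simp only [List.foldl_cons]
    rw [PySem.List.pyGetD_neg_one (h := hne), hl]
    rw [ih (acc ++ [c + x]) (c + x) (by simp) (by simp)]
    rw [List.append_assoc]
    congr 1
    rw [List.length_cons, List.range_succ_eq_map]
    simp only [List.map_cons, List.map_map]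
    rw [List.singleton_append]
    congr 1
    · simp [pvS]
    · apply List.map_congr_left
      intro t _
      simp only [Function.comp_apply, pvS_cons]
      ring

theorem bP_eq (nums : List Int) :
    nums.foldl (fun acc x => acc ++ [PySem.List.pyGetD acc (-1) 0 + x]) [0]
      = (List.range (nums.length + 1)).map (pvS nums) := by
  rw [bP_gen nums [0] 0 (by simp) (by simp)]
  rw [List.range_succ_eq_map]
  simp [pvS]

theorem P_get (nums : List Int) (t : ℕ) (ht : t ≤ nums.length) :
    PySem.List.pyGetD ((List.range (nums.length + 1)).map (pvS nums)) (t : ℤ) 0 = pvS nums t := by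
  rw [PySem.List.pyGetD_natCast]
  rw [List.getD_eq_getElem _ _ (by simp; omega)]
  simp

theorem bAdv_eq (nums : List Int) (k : Int) (p t : ℕ) (ht : t ≤ nums.length) :
    bAdv ((List.range (nums.length + 1)).map (pvS nums)) k (nums.length : ℤ) (pvS nums p) (t : ℤ)
      = (advT nums k nums.length p t : ℤ) := by
  fun_induction advT nums k nums.length p t with
  | case1 t hc ih =>
    rw [bAdv, dif_pos]
    · have := ih (by omega)
      exact_mod_cast this
    · constructor
      · exact_mod_cast hc.1
      · have hc2 : ((t : ℤ) + 1) = ((t + 1 : ℕ) : ℤ) := by push_cast; ring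
        rw [hc2, P_get nums (t + 1) (by omega)]
        exact hc.2
  | case2 t hc =>
    rw [bAdv, dif_neg]
    intro ⟨h1, h2⟩
    have ht' : t < nums.length := by exact_mod_cast h1
    apply hc
    refine ⟨ht', ?_⟩
    have hc2 : ((t : ℤ) + 1) = ((t + 1 : ℕ) : ℤ) := by push_cast; ring
    rw [hc2, P_get nums (t + 1) (by omega)] at h2
    exact h2

-- B's loop invariant: after m left endpoints the state is (tseq m, partial sum of exit spans)
theorem countB_loop (nums : List Int) (k : Int) :
    ∀ m, m ≤ nums.length →
    (PySem.List.pyRange 0 (m : ℤ) 1).foldl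
      (fun (st : Int × Int) (p : Int) =>
        let t0 := if st.1 < p then p else st.1
        let t := bAdv ((List.range (nums.length + 1)).map (pvS nums)) k (nums.length : ℤ)
          (PySem.List.pyGetD ((List.range (nums.length + 1)).map (pvS nums)) p 0) t0
        (t, st.2 + t - p))
      (0, 0)
    = ((tseq nums k nums.length m : ℤ),
        ∑ p ∈ Finset.range m, ((Tel nums k nums.length p : ℤ) - (p : ℤ))) := by
  intro m
  induction m with
  | zero => intro _; simp [PySem.List.pyRange_one_eq_nil, tseq]
  | succ m ih =>
    intro h
    have hcast : ((m + 1 : ℕ) : ℤ) = (m : ℤ) + 1 := by push_cast; ring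
    rw [hcast, PySem.List.pyRange_one_succ_right (by positivity), List.foldl_append,
        ih (by omega)]
    simp only [List.foldl_cons, List.foldl_nil]
    have hm : m < nums.length := by omega
    have ht0 : (if (tseq nums k nums.length m : ℤ) < (m : ℤ) then (m : ℤ)
        else (tseq nums k nums.length m : ℤ)) = ((max (tseq nums k nums.length m) m : ℕ) : ℤ) := by
      split_ifs with hlt
      · have : tseq nums k nums.length m < m := by exact_mod_cast hlt
        simp [Nat.max_eq_right (le_of_lt this)]
      · have hle : m ≤ tseq nums k nums.length m := by exact_mod_cast not_lt.mp hlt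
        simp [Nat.max_eq_left hle]
    rw [ht0, P_get nums m (by omega)]
    rw [bAdv_eq nums k m (max (tseq nums k nums.length m) m)
        (by have := tseq_le nums k nums.length m (by omega); omega)]
    have hT : advT nums k nums.length m (max (tseq nums k nums.length m) m)
        = Tel nums k nums.length m := rfl
    rw [hT]
    rw [Finset.sum_range_succ]
    have hts : tseq nums k nums.length (m + 1) = Tel nums k nums.length m := rfl
    rw [hts]
    have hval : (∑ p ∈ Finset.range m, ((Tel nums k nums.length p : ℤ) - (p : ℤ)))
        + (Tel nums k nums.length m : ℤ) - (m : ℤ)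
        = (∑ x ∈ Finset.range m, ((Tel nums k nums.length x : ℤ) - (x : ℤ)))
          + ((Tel nums k nums.length m : ℤ) - (m : ℤ)) := by ring
    exact Prod.ext rfl hval

theorem count_alt_eq (nums : List Int) (k : Int) :
    count_alt nums k
      = ∑ p ∈ Finset.range nums.length, ((Tel nums k nums.length p : ℤ) - (p : ℤ)) := by
  simp only [count_alt]
  rw [bP_eq]
  rw [countB_loop nums k nums.length (le_refl _)]

-- double counting: summing window lengths by right endpoint = summing exit spans by left endpoint
theorem sum_id (nums : List Int) (k : Int) (n : ℕ) :
    ∑ j ∈ Finset.range n, ((j : ℤ) + 1 - (Gfun nums k n (j + 1) : ℤ))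
      = ∑ p ∈ Finset.range n, ((Tel nums k n p : ℤ) - (p : ℤ)) := by
  have step1 : ∀ j ∈ Finset.range n,
      ((j : ℤ) + 1 - (Gfun nums k n (j + 1) : ℤ))
        = ∑ p ∈ Finset.range n, (if p ≤ j ∧ j < Tel nums k n p then (1 : ℤ) else 0) := by
    intro j hj
    have hjn : j < n := Finset.mem_range.mp hj
    have hfil : (Finset.range n).filter (fun p => p ≤ j ∧ j < Tel nums k n p)
        = Finset.Ico (Gfun nums k n (j + 1)) (j + 1) := by
      ext p
      simp only [Finset.mem_filter, Finset.mem_range, Finset.mem_Ico]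
      constructor
      · rintro ⟨hpn, hpj, hjT⟩
        exact ⟨Gfun_le nums k n (j + 1) p (by omega), by omega⟩
      · rintro ⟨h1, h2⟩
        have := (Gfun_le_iff nums k n (j + 1) p).mp h1
        exact ⟨by omega, by omega, by omega⟩
    have hGle : Gfun nums k n (j + 1) ≤ j + 1 :=
      Gfun_le nums k n (j + 1) (j + 1) (Tel_ge nums k n (j + 1))
    calc ((j : ℤ) + 1 - (Gfun nums k n (j + 1) : ℤ))
        = (((Finset.range n).filter (fun p => p ≤ j ∧ j < Tel nums k n p)).card : ℤ) := by
          rw [hfil, Nat.card_Ico]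
          push_cast [Nat.cast_sub hGle]
          ring
      _ = ∑ p ∈ Finset.range n, (if p ≤ j ∧ j < Tel nums k n p then (1 : ℤ) else 0) := by
          rw [Finset.card_filter]
          push_cast
          rfl
  have step4 : ∀ p ∈ Finset.range n,
      (∑ j ∈ Finset.range n, (if p ≤ j ∧ j < Tel nums k n p then (1 : ℤ) else 0))
        = ((Tel nums k n p : ℤ) - (p : ℤ)) := by
    intro p hp
    have hpn : p < n := Finset.mem_range.mp hp
    have hTn : Tel nums k n p ≤ n := Tel_le nums k n p (by omega)
    have hfil : (Finset.range n).filter (fun j => p ≤ j ∧ j < Tel nums k n p)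
        = Finset.Ico p (Tel nums k n p) := by
      ext j
      simp only [Finset.mem_filter, Finset.mem_range, Finset.mem_Ico]
      constructor
      · rintro ⟨_, h2, h3⟩; exact ⟨h2, h3⟩
      · rintro ⟨h1, h2⟩; exact ⟨by omega, h1, h2⟩
    calc (∑ j ∈ Finset.range n, (if p ≤ j ∧ j < Tel nums k n p then (1 : ℤ) else 0))
        = (((Finset.range n).filter (fun j => p ≤ j ∧ j < Tel nums k n p)).card : ℤ) := by
          rw [Finset.card_filter]
          push_cast
          rfl
      _ = ((Tel nums k n p : ℤ) - (p : ℤ)) := by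
          rw [hfil, Nat.card_Ico]
          push_cast [Nat.cast_sub (Tel_ge nums k n p)]
          ring
  calc ∑ j ∈ Finset.range n, ((j : ℤ) + 1 - (Gfun nums k n (j + 1) : ℤ))
      = ∑ j ∈ Finset.range n, ∑ p ∈ Finset.range n,
          (if p ≤ j ∧ j < Tel nums k n p then (1 : ℤ) else 0) := Finset.sum_congr rfl step1
    _ = ∑ p ∈ Finset.range n, ∑ j ∈ Finset.range n,
          (if p ≤ j ∧ j < Tel nums k n p then (1 : ℤ) else 0) := Finset.sum_comm
    _ = ∑ p ∈ Finset.range n, ((Tel nums k n p : ℤ) - (p : ℤ)) := Finset.sum_congr rfl step4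

-- ===== VERDICT (by name: the statement is the Claim_ definition above) =====
theorem count_spec : Claim_equal_count := by
  intro nums k _
  unfold Spec_count
  rw [count_eq, count_alt_eq]
  have h1 : ∑ j ∈ Finset.range nums.length, ((j : ℤ) + 1 - (Iseq nums k (j + 1) : ℤ))
      = ∑ j ∈ Finset.range nums.length,
          ((j : ℤ) + 1 - (Gfun nums k nums.length (j + 1) : ℤ)) := by
    apply Finset.sum_congr rfl
    intro j hj
    rw [Iseq_eq_G nums k nums.length (j + 1)
      (Nat.succ_le_of_lt (Finset.mem_range.mp hj))]
  rw [h1, sum_id]
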